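-- pv_equiv track=rewrite | github.com/rafisudrajat/nlp-100-exercise | chapter 1/src/p3.py | split_word_count_char
-- ===== SOURCE A (Python) =====
-- def split_word_count_char(sentence:str)->list[int]:
--     char_count_in_words=[]
--     char_counter=0
--     for char in sentence:
--         if (ord(char)>=65 and ord(char)<=90) or (ord(char)>=97 and ord(char)<=122):
--             char_counter+=1
--         if ord(char)==32:
--             char_count_in_words.append(char_counter)
--             char_counter=0
--     char_count_in_words.append(char_counter)
--     return char_count_in_words
-- ===== SOURCE B (Python) =====
-- def split_word_count_char(sentence: str) -> list[int]:
--     words = sentence.split(' ')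
--     return [sum(1 for ch in word if ch.isascii() and ch.isalpha()) for word in words]
-- ===== Notes on version B (the rewrite author's own statement) =====
-- stated objective: simpler
-- what changed: Replaces A's single interleaved character loop carrying a running counter and result list with two separate passes: split the sentence on the space character, then count ASCII letters per word with a comprehension.
import Mathlib
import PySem

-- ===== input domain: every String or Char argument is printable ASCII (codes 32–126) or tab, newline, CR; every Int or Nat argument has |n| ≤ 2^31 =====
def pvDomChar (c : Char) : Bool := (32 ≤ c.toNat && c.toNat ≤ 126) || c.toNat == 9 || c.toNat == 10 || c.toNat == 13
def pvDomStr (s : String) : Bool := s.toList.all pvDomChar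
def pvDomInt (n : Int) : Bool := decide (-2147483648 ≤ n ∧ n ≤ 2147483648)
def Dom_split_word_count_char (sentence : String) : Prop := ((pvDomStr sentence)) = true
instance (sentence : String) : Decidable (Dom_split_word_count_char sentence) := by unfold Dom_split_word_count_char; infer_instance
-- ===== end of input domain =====

-- B replaces A's single interleaved char loop (running counter + result list) with two passes:
-- split on the space character, then count ASCII letters per word. Objective: simpler decomposition.


-- ===== PORT A =====
-- A's letter test: (ord(char)>=65 and ord(char)<=90) or (ord(char)>=97 and ord(char)<=122)
def pvIsLetter (c : Char) : Bool := (65 ≤ c.toNat && c.toNat ≤ 90) || (97 ≤ c.toNat && c.toNat ≤ 122)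

-- A's loop body on the state (char_count_in_words, char_counter)
def pvStep (st : List Int × Int) (c : Char) : List Int × Int :=
  let st1 := if pvIsLetter c then (st.1, st.2 + 1) else st
  if c.toNat == 32 then (st1.1 ++ [st1.2], 0) else st1

def split_word_count_char (sentence : String) : List Int :=
  let st := sentence.toList.foldl pvStep ([], 0)
  st.1 ++ [st.2]

-- ===== PORT B =====
-- sum(1 for ch in word if ch.isascii() and ch.isalpha())
def pvCountLetters (w : List Char) : Int :=
  ((w.countP (fun c => c.toNat ≤ 127 && PySem.Chars.isalpha c) : Nat) : Int)

-- sentence.split(' ') ported as List.splitOn ' ' (single-character separator, empty segments kept)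
def split_word_count_char_alt (sentence : String) : List Int :=
  (sentence.toList.splitOn ' ').map pvCountLetters

-- ===== PRECONDITION & SPEC =====
def Spec_split_word_count_char (sentence : String) (out : List Int) : Prop := out = split_word_count_char_alt sentence
instance (sentence : String) (out : List Int) : Decidable (Spec_split_word_count_char sentence out) := by unfold Spec_split_word_count_char; infer_instance

-- ===== CLAIM (what is proved, stated in full; the proofs are below) =====
def Claim_equal_split_word_count_char : Prop := ∀ (sentence : String), Dom_split_word_count_char sentence → Spec_split_word_count_char sentence (split_word_count_char sentence)

-- ===== LEMMAS AND PROOFS =====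

-- add k to the first entry of a list (how a pending counter k combines with B's per-word counts)
def pvAddFirst (k : Int) : List Int → List Int
  | [] => []
  | x :: xs => (k + x) :: xs

-- the two letter predicates agree on every Char
theorem pvPred_eq (c : Char) :
    (c.toNat ≤ 127 && PySem.Chars.isalpha c) = pvIsLetter c := by
  rw [Bool.eq_iff_iff]
  simp only [pvIsLetter, PySem.Chars.isalpha, PySem.Chars.isupper, PySem.Chars.islower,
    Bool.and_eq_true, Bool.or_eq_true, decide_eq_true_eq, Char.le_def,
    UInt32.le_iff_toNat_le, Char.toNat,
    show ('A').val.toNat = 65 from rfl, show ('Z').val.toNat = 90 from rfl,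
    show ('a').val.toNat = 97 from rfl, show ('z').val.toNat = 122 from rfl]
  omega

theorem pvLoop (cs : List Char) : ∀ (acc : List Int) (k : Int),
    (cs.foldl pvStep (acc, k)).1 ++ [(cs.foldl pvStep (acc, k)).2]
      = acc ++ pvAddFirst k ((cs.splitOn ' ').map pvCountLetters) := by
  induction cs with
  | nil =>
    intro acc k
    simp [List.splitOn, List.splitOnP_nil, pvAddFirst, pvCountLetters]
  | cons c cs ih =>
    intro acc k
    simp only [List.splitOn] at ih ⊢
    obtain ⟨x, xs, hS⟩ : ∃ x xs, cs.splitOnP (fun y => y == ' ') = x :: xs := by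
      rcases h : cs.splitOnP (fun y => y == ' ') with _ | ⟨x, xs⟩
      · exact absurd h (List.splitOnP_ne_nil _ cs)
      · exact ⟨x, xs, rfl⟩
    by_cases hsp : c = ' '
    · subst hsp
      have hstep : pvStep (acc, k) ' ' = (acc ++ [k], 0) := by
        simp [pvStep, pvIsLetter]
      rw [List.foldl_cons, hstep, ih]
      simp [List.splitOnP_cons, hS, pvAddFirst, pvCountLetters, List.append_assoc]
    · have hc32 : (c.toNat == 32) = false := by
        rw [beq_eq_false_iff_ne]
        intro h
        exact hsp (Char.ext (UInt32.toNat_inj.mp h))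
      have hbeq : (c == ' ') = false := beq_eq_false_iff_ne.mpr hsp
      have hsplit : (c :: cs).splitOnP (fun y => y == ' ') = (c :: x) :: xs := by
        rw [List.splitOnP_cons, hbeq, hS]
        rfl
      by_cases hl : pvIsLetter c = true
      · have hstep : pvStep (acc, k) c = (acc, k + 1) := by
          simp [pvStep, hl, hc32]
        rw [List.foldl_cons, hstep, ih]
        have hcnt : pvCountLetters (c :: x) = pvCountLetters x + 1 := by
          simp [pvCountLetters, pvPred_eq, hl]
        simp [hsplit, hS, pvAddFirst, hcnt]
        ring
      · have hstep : pvStep (acc, k) c = (acc, k) := by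
          simp [pvStep, hl, hc32]
        rw [List.foldl_cons, hstep, ih]
        have hcnt : pvCountLetters (c :: x) = pvCountLetters x := by
          simp [pvCountLetters, pvPred_eq, hl]
        simp [hsplit, hS, pvAddFirst, hcnt]

-- ===== VERDICT (by name: the statement is the Claim_ definition above) =====
theorem split_word_count_char_spec : Claim_equal_split_word_count_char := by
  intro sentence _
  unfold Spec_split_word_count_char split_word_count_char split_word_count_char_alt
  rw [pvLoop]
  obtain ⟨x, xs, hS⟩ : ∃ x xs, sentence.toList.splitOn ' ' = x :: xs := by
    rcases h : sentence.toList.splitOn ' ' with _ | ⟨x, xs⟩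
    · exact absurd h (List.splitOnP_ne_nil _ _)
    · exact ⟨x, xs, rfl⟩
  simp [hS, pvAddFirst]
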